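-- pv_equiv track=rewrite | github.com/marcins21/python_classes | Assignment3/exercise3.py | exercise_3_6
-- ===== SOURCE A (Python) =====
-- def exercise_3_6(height: int, width: int) -> str:
--     line = "+----"
--     pipes = "|    "
--
--     horizontal_line = line * width
--     horizontal_line += "+"
--     horizontal_pipes = pipes * width
--     horizontal_pipes += "|"
--
--     result = horizontal_line + "\n"
--     units = 0
--     while units != height:
--         result += horizontal_pipes + "\n"
--         result += horizontal_line + "\n"
--         units += 1
--     return result
-- ===== SOURCE B (Python) =====
-- def _rep(s: str, n: int) -> str:
--     # s repeated n times, by recursive binary doubling (empty for n <= 0)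
--     if n <= 0:
--         return ""
--     half = _rep(s, n // 2)
--     return half + half + (s if n % 2 else "")
--
-- def exercise_3_6(height: int, width: int) -> str:
--     # Divide-and-conquer: every repetition (the cells of a row, the row pairs of
--     # the grid) is produced by logarithmic-depth doubling instead of a linear loop.
--     line = _rep("+----", width) + "+"
--     pipes = _rep("|    ", width) + "|"
--     return line + "\n" + _rep(pipes + "\n" + line + "\n", height)
-- ===== Notes on version B (the rewrite author's own statement) =====
-- stated objective: alternative
-- what changed: All repetition (row cells and row blocks) is produced by a recursive binary-doubling helper of logarithmic depth instead of A's linear accumulator while loop, whose repeated string += makes A quadratic in the output size (B also returns the bare header line for height < 0, where A's while loop never terminates).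
import Mathlib
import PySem

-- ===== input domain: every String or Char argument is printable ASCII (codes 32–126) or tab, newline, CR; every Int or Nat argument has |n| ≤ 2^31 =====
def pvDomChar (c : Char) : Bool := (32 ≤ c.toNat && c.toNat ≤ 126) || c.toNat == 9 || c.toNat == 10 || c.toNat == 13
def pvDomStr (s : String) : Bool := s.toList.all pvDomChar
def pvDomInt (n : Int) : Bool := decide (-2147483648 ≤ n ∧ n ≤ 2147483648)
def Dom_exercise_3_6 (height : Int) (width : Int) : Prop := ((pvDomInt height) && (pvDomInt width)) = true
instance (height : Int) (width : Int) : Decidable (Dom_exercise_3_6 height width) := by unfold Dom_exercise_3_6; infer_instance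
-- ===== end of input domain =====

-- B replaces A's linear while loop (and Python's built-in string repetition) by a recursive
-- binary-doubling repetition used for both the row cells and the row blocks
-- (objective: alternative decomposition, logarithmic recursion depth instead of a linear loop).

-- Python string repetition s * n over List Char (n ≤ 0 gives the empty string, as in Python).
def pvStrMul (s : List Char) (n : Int) : List Char := (List.replicate n.toNat s).flatten

-- ===== PORT A =====
-- the while loop: runs while units != height, i.e. height times (on height < 0 Python A never
-- terminates and returns no value, so fidelity there is vacuous; the port runs the loop 0 times)
def pvLoopA (hp hl : List Char) : Nat → List Char → List Char
  | 0, r => r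
  | n + 1, r => pvLoopA hp hl n (r ++ hp ++ ['\n'] ++ hl ++ ['\n'])

def exercise_3_6 (height : Int) (width : Int) : String :=
  let horizontal_line := pvStrMul "+----".toList width ++ ['+']
  let horizontal_pipes := pvStrMul "|    ".toList width ++ ['|']
  String.ofList (pvLoopA horizontal_pipes horizontal_line height.toNat (horizontal_line ++ ['\n']))

-- ===== PORT B =====
-- _rep: s repeated n times by recursive binary doubling (empty for n ≤ 0)
def pvRep (s : List Char) (n : Int) : List Char :=
  if h : n ≤ 0 then []
  else
    let half := pvRep s (PySem.Int.floordiv n 2)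
    half ++ half ++ (if PySem.Int.mod n 2 ≠ 0 then s else [])
termination_by n.toNat
decreasing_by
  rw [PySem.Int.floordiv_eq_ediv_of_pos (by norm_num)]
  omega

def exercise_3_6_alt (height : Int) (width : Int) : String :=
  let line := pvRep "+----".toList width ++ ['+']
  let pipes := pvRep "|    ".toList width ++ ['|']
  String.ofList (line ++ ['\n'] ++ pvRep (pipes ++ ['\n'] ++ line ++ ['\n']) height)

-- ===== PRECONDITION & SPEC =====
def Spec_exercise_3_6 (height : Int) (width : Int) (out : String) : Prop := out = exercise_3_6_alt height width
instance (height : Int) (width : Int) (out : String) : Decidable (Spec_exercise_3_6 height width out) := by unfold Spec_exercise_3_6; infer_instance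

-- ===== CLAIM (what is proved, stated in full; the proofs are below) =====
def Claim_equal_exercise_3_6 : Prop := ∀ (height : Int) (width : Int), Dom_exercise_3_6 height width → Spec_exercise_3_6 height width (exercise_3_6 height width)

-- ===== LEMMAS AND PROOFS =====

-- A's loop appends the same block height times.
theorem pvLoopA_eq (hp hl : List Char) (n : Nat) (r : List Char) :
    pvLoopA hp hl n r = r ++ (List.replicate n (hp ++ ['\n'] ++ hl ++ ['\n'])).flatten := by
  induction n generalizing r with
  | zero => simp [pvLoopA]
  | succ k ih => simp [pvLoopA, ih, List.replicate_succ, List.flatten_cons]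

-- concatenating two repetitions of the same piece is one longer repetition
theorem pvRepFlat (a b : Nat) (s : List Char) :
    (List.replicate a s).flatten ++ (List.replicate b s).flatten
      = (List.replicate (a + b) s).flatten := by
  rw [List.replicate_add, List.flatten_append]

-- the doubling recursion computes plain repetition (Nat argument)
theorem pvRep_natCast (s : List Char) (m : Nat) :
    pvRep s (m : Int) = (List.replicate m s).flatten := by
  induction m using Nat.strong_induction_on with
  | _ m ih =>
    rw [pvRep]
    by_cases h : (m : Int) ≤ 0
    · have h0 : m = 0 := by omega
      subst h0
      simp
    · rw [dif_neg h]
      have hm : 0 < m := by omega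
      rw [show PySem.Int.floordiv (m:Int) 2 = ((m / 2 : Nat) : Int) by
            exact_mod_cast PySem.Int.floordiv_natCast m 2,
          show PySem.Int.mod (m:Int) 2 = ((m % 2 : Nat) : Int) by
            exact_mod_cast PySem.Int.mod_natCast m 2,
          ih (m / 2) (by omega)]
      by_cases h2 : m % 2 = 0
      · rw [h2, if_neg (by norm_num : ¬(((0:Nat):Int) ≠ 0)), List.append_nil,
            pvRepFlat, show m / 2 + m / 2 = m by omega]
      · have h1 : m % 2 = 1 := by omega
        rw [h1, if_pos (by norm_num : (((1:Nat):Int) ≠ 0))]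
        show (List.replicate (m / 2) s).flatten ++ (List.replicate (m / 2) s).flatten ++ s
              = (List.replicate m s).flatten
        rw [List.append_assoc,
            show ((List.replicate (m / 2) s).flatten ++ s)
              = (List.replicate (m / 2) s).flatten ++ (List.replicate 1 s).flatten by simp,
            pvRepFlat, pvRepFlat, show m / 2 + (m / 2 + 1) = m by omega]

-- the same for any Int argument (negative counts give the empty repetition on both sides)
theorem pvRep_eq (s : List Char) (n : Int) :
    pvRep s n = (List.replicate n.toNat s).flatten := by
  by_cases h : n ≤ 0
  · rw [pvRep, dif_pos h, Int.toNat_of_nonpos h]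
    simp
  · rw [show n = ((n.toNat : Nat) : Int) by omega, pvRep_natCast, Int.toNat_natCast]

-- ===== VERDICT (by name: the statement is the Claim_ definition above) =====
theorem exercise_3_6_spec : Claim_equal_exercise_3_6 := by
  intro height width _
  unfold Spec_exercise_3_6 exercise_3_6 exercise_3_6_alt
  simp only [pvRep_eq, pvStrMul, pvLoopA_eq, List.append_assoc]
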